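-- pv_equiv track=rewrite | github.com/FHSU-AustinHoward/aes-cipher-decipher | aes_from_scratch.py | string_to_blocks
-- ===== SOURCE A (Python) =====
-- def string_to_blocks(s, block_size=16):
--     data = list(s.encode('utf-8'))
--     blocks = []
--     for i in range(0, len(data), block_size):
--         block = data[i:i+block_size]
--         if len(block) < block_size:
--             block += [0x00] * (block_size - len(block))
--         blocks.append(block)
--     return blocks
-- ===== SOURCE B (Python) =====
-- def string_to_blocks(s, block_size=16):
--     blocks = []
--     cur = []
--     for byte in s.encode('utf-8'):
--         cur.append(byte)
--         if len(cur) == block_size: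
--             blocks.append(cur)
--             cur = []
--     if cur:
--         blocks.append(cur + [0x00] * (block_size - len(cur)))
--     return blocks
-- ===== Notes on version B (the rewrite author's own statement) =====
-- stated objective: alternative
-- what changed: B never slices or indexes: it streams the bytes one at a time into a current-block accumulator, flushing it whenever it reaches block_size and zero-padding the leftover once at the end, instead of A's index loop over range(0, len, block_size) with per-block slicing and padding.
-- outside the precondition, e.g. on string_to_blocks('ab', -2): A returns [], B returns [[97, 98]]
import Mathlib
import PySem

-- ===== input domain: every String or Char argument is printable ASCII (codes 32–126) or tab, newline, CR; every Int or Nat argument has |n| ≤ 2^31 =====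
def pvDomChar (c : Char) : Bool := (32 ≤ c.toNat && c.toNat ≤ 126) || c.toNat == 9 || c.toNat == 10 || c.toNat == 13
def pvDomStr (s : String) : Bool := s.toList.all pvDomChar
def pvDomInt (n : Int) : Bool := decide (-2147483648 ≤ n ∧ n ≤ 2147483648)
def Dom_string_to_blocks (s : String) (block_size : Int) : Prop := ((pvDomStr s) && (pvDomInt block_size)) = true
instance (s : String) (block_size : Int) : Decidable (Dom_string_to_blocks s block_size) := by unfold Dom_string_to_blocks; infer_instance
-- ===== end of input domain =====

-- B streams the utf-8 bytes one at a time into a current-block accumulator, flushing a block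
-- whenever it fills and zero-padding the leftover once at the end; A slices by index over
-- range(0, len, block_size) and pads each short slice (objective: alternative, same O(n) cost).


-- ===== PORT A =====
-- utf-8 encoding of an ASCII string (Dom guarantees ASCII) is exactly its code points
def string_to_blocks (s : String) (block_size : Int) : List (List Int) :=
  let data : List Int := s.toList.map (fun c => (c.toNat : Int))
  (PySem.List.pyRange 0 (data.length : Int) block_size).foldl
    (fun blocks i =>
      let block := PySem.List.slice data (some i) (some (i + block_size))
      let block := if (block.length : Int) < block_size
        then block ++ List.replicate (block_size - (block.length : Int)).toNat 0
        else block
      blocks ++ [block]) []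

-- ===== PORT B =====
-- loop body: append the byte to cur; flush cur as a finished block when it reaches block_size
def bStep (block_size : Int) (acc : List (List Int) × List Int) (b : Int) :
    List (List Int) × List Int :=
  let cur := acc.2 ++ [b]
  if (cur.length : Int) = block_size then (acc.1 ++ [cur], []) else (acc.1, cur)

-- 'if cur: blocks.append(cur + [0x00] * (block_size - len(cur)))'
def bFinish (block_size : Int) (acc : List (List Int) × List Int) : List (List Int) :=
  if acc.2.isEmpty then acc.1
  else acc.1 ++ [acc.2 ++ List.replicate (block_size - (acc.2.length : Int)).toNat 0]

def string_to_blocks_alt (s : String) (block_size : Int) : List (List Int) :=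
  let bytes : List Int := s.toList.map (fun c => (c.toNat : Int))
  bFinish block_size (bytes.foldl (bStep block_size) ([], []))

-- ===== PRECONDITION & SPEC =====
-- Pre_ restricts to the natural domain block_size ≥ 1: at block_size = 0 the Python A raises
-- ValueError (range step 0); for block_size < 0 A returns [] — an artefact of range's emptiness
-- on a negative step, dropping all data — while B returns the bytes as one unpadded block.
def Pre_string_to_blocks (s : String) (block_size : Int) : Prop := 1 ≤ block_size
instance (s : String) (block_size : Int) : Decidable (Pre_string_to_blocks s block_size) := by
  unfold Pre_string_to_blocks; infer_instance

def pvWitness_string_to_blocks : String × Int := ("hello", 2)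

def Spec_string_to_blocks (s : String) (block_size : Int) (out : List (List Int)) : Prop :=
  out = string_to_blocks_alt s block_size
instance (s : String) (block_size : Int) (out : List (List Int)) :
    Decidable (Spec_string_to_blocks s block_size out) := by
  unfold Spec_string_to_blocks; infer_instance

-- ===== CLAIM (what is proved, stated in full; the proofs are below) =====
def Claim_equal_string_to_blocks : Prop := ∀ (s : String) (block_size : Int), Dom_string_to_blocks s block_size → Pre_string_to_blocks s block_size → Spec_string_to_blocks s block_size (string_to_blocks s block_size)

-- ===== LEMMAS AND PROOFS =====

-- the common shape both ports reduce to: blocks of size k+1, last one zero-padded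
def chunksPad (k : Nat) : List Int → List (List Int)
  | [] => []
  | b :: rest =>
      ((b :: rest.take k) ++ List.replicate (k - (rest.take k).length) 0)
        :: chunksPad k (rest.drop k)
termination_by l => l.length
decreasing_by simp

lemma chunksPad_nil (k : Nat) : chunksPad k [] = [] := by simp [chunksPad]

lemma chunksPad_cons (k : Nat) (b : Int) (rest : List Int) :
    chunksPad k (b :: rest) =
      ((b :: rest.take k) ++ List.replicate (k - (rest.take k).length) 0)
        :: chunksPad k (rest.drop k) := by simp [chunksPad]

lemma pyRange_pos_nil (i n bs : Int) (hbs : 0 < bs) (h : n ≤ i) :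
    PySem.List.pyRange i n bs = [] := by
  rw [PySem.List.pyRange_of_pos _ _ hbs, if_neg (by omega)]
  simp

lemma pyRange_pos_cons (i n bs : Int) (hbs : 0 < bs) (h : i < n) :
    PySem.List.pyRange i n bs = i :: PySem.List.pyRange (i + bs) n bs := by
  rw [PySem.List.pyRange_of_pos _ _ hbs, PySem.List.pyRange_of_pos _ _ hbs, if_pos h]
  have hM : n - i + bs - 1 = (n - i - 1) + 1 * bs := by ring
  rw [hM, Int.add_mul_ediv_right _ _ (by omega : bs ≠ 0)]
  have hq0 : 0 ≤ (n - i - 1) / bs := Int.ediv_nonneg (by omega) (by omega)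
  have ht : ((n - i - 1) / bs + 1).toNat = ((n - i - 1) / bs).toNat + 1 := by omega
  rw [ht, List.range_succ_eq_map]
  simp only [List.map_cons, List.map_map]
  congr 1
  · norm_num
  by_cases h2 : i + bs < n
  · rw [if_pos h2]
    have : n - (i + bs) + bs - 1 = n - i - 1 := by ring
    rw [this]
    apply List.map_congr_left
    intro k _
    simp [Function.comp]
    ring
  · rw [if_neg h2]
    have : (n - i - 1) / bs = 0 :=
      Int.ediv_eq_zero_of_lt (by omega) (by omega)
    simp [this]

-- A's mapped body at a valid start index is one chunk, and the rest of the range the rest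
lemma A_eq_chunks (bs : Int) (k : Nat) (hbs : bs = (k : Int) + 1) (data : List Int) :
    ∀ (d : Nat) (i : Int), 0 ≤ i → (((data.length : Int)) - i).toNat = d →
    (PySem.List.pyRange i (data.length : Int) bs).map
      (fun i =>
        let block := PySem.List.slice data (some i) (some (i + bs))
        if (block.length : Int) < bs
          then block ++ List.replicate (bs - (block.length : Int)).toNat 0
          else block)
    = chunksPad k (data.drop i.toNat) := by
  intro d
  induction d using Nat.strong_induction_on with
  | _ d ih =>
    intro i hi hd
    by_cases h : i < (data.length : Int)
    · rw [pyRange_pos_cons _ _ _ (by omega) h, List.map_cons]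
      have hlt : i.toNat < data.length := by omega
      cases hdrop : data.drop i.toNat with
      | nil => exfalso; have := congrArg List.length hdrop; simp at this; omega
      | cons b rest =>
        rw [chunksPad_cons]
        have hslice : PySem.List.slice data (some i) (some (i + bs)) =
            b :: rest.take k := by
          rw [PySem.List.slice_toNat _ hi (by omega)]
          have : (i + bs).toNat - i.toNat = k + 1 := by omega
          rw [this, hdrop, List.take_succ_cons]
        congr 1
        · -- head block
          simp only [hslice]
          have hL : (rest.take k).length ≤ k := by simp
          by_cases hfull : (rest.take k).length = k
          · rw [if_neg (by simp [hfull]; omega)]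
            simp [hfull]
          · rw [if_pos (by rw [List.length_cons]; push_cast; omega)]
            congr 1
            congr 1
            simp
            omega
        · -- tail
          have hrec := ih (((data.length : Int)) - (i + bs)).toNat (by omega) (i + bs)
            (by omega) rfl
          rw [hrec]
          congr 1
          have : (i + bs).toNat = i.toNat + (k + 1) := by omega
          rw [this, ← List.drop_drop, hdrop]
          simp
    · rw [pyRange_pos_nil _ _ _ (by omega) (by omega),
        List.drop_eq_nil_of_le (by omega), chunksPad_nil]
      simp
  
-- B's accumulator invariant: the flushed blocks plus the chunks of cur ++ remaining input
lemma B_eq_chunks (bs : Int) (k : Nat) (hbs : bs = (k : Int) + 1) :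
    ∀ (data cur : List Int) (blocks : List (List Int)), cur.length ≤ k →
    bFinish bs (data.foldl (bStep bs) (blocks, cur))
      = blocks ++ chunksPad k (cur ++ data) := by
  intro data
  induction data with
  | nil =>
    intro cur blocks hcur
    simp only [List.foldl_nil, bFinish, List.append_nil]
    cases cur with
    | nil => simp [chunksPad_nil]
    | cons c t =>
      simp only [List.isEmpty_cons, Bool.false_eq_true, if_false, chunksPad_cons]
      have ht : t.length + 1 ≤ k := by simpa using hcur
      rw [List.take_of_length_le (by omega), List.drop_eq_nil_of_le (by omega), chunksPad_nil]
      simp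
      omega
  | cons b data' ih =>
    intro cur blocks hcur
    simp only [List.foldl_cons, bStep]
    by_cases hfull : (((cur ++ [b]).length : Int)) = bs
    · rw [if_pos hfull]
      rw [ih [] (blocks ++ [cur ++ [b]]) (by simp)]
      have hlen : (cur ++ [b]).length = k + 1 := by
        simp at hfull ⊢; omega
      cases hcb : cur ++ [b] with
      | nil => simp at hcb
      | cons c0 ct =>
        have hct : ct.length = k := by rw [hcb] at hlen; simp at hlen; omega
        have : cur ++ b :: data' = c0 :: (ct ++ data') := by
          have h2 := congrArg (fun l => l ++ data') hcb
          simpa using h2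
        rw [this, chunksPad_cons]
        rw [← hct, List.take_left, List.drop_left]
        simp [hct]
    · rw [if_neg hfull]
      rw [ih (cur ++ [b]) blocks (by simp at hfull ⊢; omega)]
      simp

-- ===== VERDICT (by name: the statement is the Claim_ definition above) =====
theorem string_to_blocks_spec : Claim_equal_string_to_blocks := by
  intro s bs _ hpre
  unfold Pre_string_to_blocks at hpre
  unfold Spec_string_to_blocks
  simp only [string_to_blocks, string_to_blocks_alt]
  set data : List Int := s.toList.map (fun c => (c.toNat : Int)) with hdata
  set k : Nat := (bs - 1).toNat with hk
  have hbs : bs = (k : Int) + 1 := by omega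
  rw [PySem.List.foldl_append_singleton_eq_map
    (fun i =>
      let block := PySem.List.slice data (some i) (some (i + bs))
      if (block.length : Int) < bs
        then block ++ List.replicate (bs - (block.length : Int)).toNat 0
        else block)]
  rw [List.nil_append]
  rw [A_eq_chunks bs k hbs data ((data.length : Int) - 0).toNat 0 le_rfl rfl]
  rw [B_eq_chunks bs k hbs data [] [] (by simp)]
  simp
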